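-- pv_equiv track=rewrite | github.com/vlin39/project5 | src/sol_file_writer.py | parse_solution_string
-- ===== SOURCE A (Python) =====
-- def parse_solution_string(solution: str, num_vehicles: int) -> tuple[int, list[list[int]]]:
--     """
--     Convert wire-format Solution string into (optimality_flag, routes).
--
--     Example: "0 0 1 2 3 0 0 4 0 0 0 0 0"
--               ^ flag
--                 ^^^^^^^^^^^^^^^^^^^^^^^^ flattened routes
--         -> (0, [[0, 1, 2, 3, 0], [0, 4, 0], [0, 0], [0, 0]])
--     """
--     tokens = [int(x) for x in str(solution).split()]
--     if not tokens:
--         raise ValueError("Empty solution string")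
--     flag = tokens[0]
--     rest = tokens[1:]
--
--     routes = []
--     current = []
--     for node in rest:
--         current.append(node)
--         if node == 0 and len(current) > 1:
--             routes.append(current)
--             current = []
--             if len(routes) == num_vehicles: break
--
--     while len(routes) < num_vehicles:
--         routes.append([0, 0])
--
--     return flag, routes[:num_vehicles]
-- ===== SOURCE B (Python) =====
-- def parse_solution_string(solution: str, num_vehicles: int) -> tuple[int, list[list[int]]]:
--     """Cut-point decomposition: record route boundaries in one pass, then
--     materialise routes as slices and pad arithmetically (no break, no while)."""
--     tokens = [int(x) for x in str(solution).split()]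
--     if not tokens:
--         raise ValueError("Empty solution string")
--     flag = tokens[0]
--     rest = tokens[1:]
--
--     cuts = []
--     start = 0
--     for i, node in enumerate(rest):
--         if node == 0 and i > start:
--             cuts.append((start, i + 1))
--             start = i + 1
--
--     routes = [rest[a:b] for a, b in cuts] + [[0, 0]] * (num_vehicles - len(cuts))
--     return flag, routes[:num_vehicles]
-- ===== Notes on version B (the rewrite author's own statement) =====
-- stated objective: alternative
-- what changed: B records route boundary cut-points in one index-based pass and materialises routes as slices, padding arithmetically with list multiplication and no break/while, instead of A's accumulator scan with early break plus a padding while-loop.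
import Mathlib
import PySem

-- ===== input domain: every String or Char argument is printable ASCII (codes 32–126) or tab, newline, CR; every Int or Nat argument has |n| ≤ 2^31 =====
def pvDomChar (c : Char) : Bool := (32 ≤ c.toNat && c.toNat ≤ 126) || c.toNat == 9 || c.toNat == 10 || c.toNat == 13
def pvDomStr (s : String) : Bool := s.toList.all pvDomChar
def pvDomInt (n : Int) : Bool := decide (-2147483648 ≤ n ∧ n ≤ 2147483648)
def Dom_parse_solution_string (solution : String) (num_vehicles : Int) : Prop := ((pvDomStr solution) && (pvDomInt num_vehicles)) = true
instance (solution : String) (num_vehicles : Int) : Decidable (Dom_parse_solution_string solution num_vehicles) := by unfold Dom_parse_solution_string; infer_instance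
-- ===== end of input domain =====

-- B replaces A's accumulator scan with early break and padding while-loop by a cut-point pass,
-- slice materialisation and arithmetic padding (objective: alternative decomposition, same cost).

-- ===== PORT A =====
-- tokens = [int(x) for x in str(solution).split()]  — identical first line of both Pythons, shared;
-- an unparsable token yields a junk 0 (Pre_ excludes those inputs: Python raises ValueError there)
def pvTokens (solution : String) : List Int :=
  (PySem.Str.split₀ solution).map (fun t => (PySem.Int.ofStr? t).getD 0)

-- the 'for node in rest' loop with its early break
def pvA_loop (rest : List Int) (n : Int) (routes : List (List Int)) (current : List Int) :
    List (List Int) :=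
  match rest with
  | [] => routes
  | node :: t =>
    let cur := current ++ [node]
    if node = 0 ∧ cur.length > 1 then
      let r := routes ++ [cur]
      if (r.length : Int) = n then r else pvA_loop t n r []
    else pvA_loop t n routes cur

-- while len(routes) < num_vehicles: routes.append([0, 0])
def pvA_pad (routes : List (List Int)) (n : Int) : List (List Int) :=
  if (routes.length : Int) < n then pvA_pad (routes ++ [[0, 0]]) n else routes
termination_by (n - routes.length).toNat
decreasing_by
  simp only [List.length_append, List.length_cons, List.length_nil, Nat.cast_add, Nat.cast_one]
  omega

def parse_solution_string (solution : String) (num_vehicles : Int) : Int × List (List Int) :=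
  match pvTokens solution with
  | [] => (0, [])  -- raise ValueError("Empty solution string"); excluded by Pre_
  | flag :: rest =>
    let routes := pvA_loop rest num_vehicles [] []
    let routes := pvA_pad routes num_vehicles
    (flag, PySem.List.slice routes none (some num_vehicles))

-- ===== PORT B =====
-- body of B's 'for i, node in enumerate(rest)' cut-point loop; state = (cuts, start)
def pvB_step (st : List (Int × Int) × Int) (p : Int × Int) : List (Int × Int) × Int :=
  if p.2 = 0 ∧ p.1 > st.2 then (st.1 ++ [(st.2, p.1 + 1)], p.1 + 1) else st

def parse_solution_string_alt (solution : String) (num_vehicles : Int) : Int × List (List Int) :=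
  match pvTokens solution with
  | [] => (0, [])  -- raise ValueError("Empty solution string"); excluded by Pre_
  | flag :: rest =>
    let cuts := ((PySem.List.enumerate rest).foldl pvB_step ([], 0)).1
    let routes := cuts.map (fun c => PySem.List.slice rest (some c.1) (some c.2))
        ++ PySem.List.pyRepeat [[0, 0]] (num_vehicles - (cuts.length : Int))
    (flag, PySem.List.slice routes none (some num_vehicles))

-- ===== PRECONDITION & SPEC =====
-- exactly where Python A returns: a nonempty token list, every token int()-parsable (else ValueError)
def Pre_parse_solution_string (solution : String) (num_vehicles : Int) : Prop :=
  PySem.Str.split₀ solution ≠ [] ∧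
    ∀ t ∈ PySem.Str.split₀ solution, (PySem.Int.ofStr? t).isSome
instance (solution : String) (num_vehicles : Int) :
    Decidable (Pre_parse_solution_string solution num_vehicles) := by
  unfold Pre_parse_solution_string; infer_instance

def pvWitness_parse_solution_string : String × Int := ("0 0 1 2 3 0 0 4 0", 3)

def Spec_parse_solution_string (solution : String) (num_vehicles : Int)
    (out : Int × List (List Int)) : Prop := out = parse_solution_string_alt solution num_vehicles
instance (solution : String) (num_vehicles : Int) (out : Int × List (List Int)) :
    Decidable (Spec_parse_solution_string solution num_vehicles out) := by
  unfold Spec_parse_solution_string; infer_instance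

-- ===== CLAIM (what is proved, stated in full; the proofs are below) =====
def Claim_equal_parse_solution_string : Prop := ∀ (solution : String) (num_vehicles : Int), Dom_parse_solution_string solution num_vehicles → Pre_parse_solution_string solution num_vehicles → Spec_parse_solution_string solution num_vehicles (parse_solution_string solution num_vehicles)

-- ===== LEMMAS AND PROOFS =====

-- proof-side: the full (break-free) route scan of A
def pvSegs (current : List Int) : List Int → List (List Int)
  | [] => []
  | x :: t =>
    if x = 0 ∧ current ≠ [] then (current ++ [x]) :: pvSegs [] t
    else pvSegs (current ++ [x]) t

lemma pvSegs_cons (current : List Int) (x : Int) (t : List Int) :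
    pvSegs current (x :: t)
      = if x = 0 ∧ current ≠ [] then (current ++ [x]) :: pvSegs [] t
        else pvSegs (current ++ [x]) t := rfl

-- shape of the final (pre-slice) result list shared by both sides
def pvPadded (s : List (List Int)) (n : Int) : List (List Int) :=
  s ++ List.replicate (n - s.length).toNat [0, 0]

-- the padding while-loop is an arithmetic pad
lemma pvA_pad_eq (routes : List (List Int)) (n : Int) :
    pvA_pad routes n = pvPadded routes n := by
  unfold pvPadded
  fun_induction pvA_pad routes n with
  | case1 routes h ih =>
    rw [ih]
    have h1 : (n - (routes.length : Int)).toNat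
        = (n - ((routes ++ [[0,0]]).length : Int)).toNat + 1 := by
      simp only [List.length_append, List.length_cons, List.length_nil]
      omega
    rw [h1, List.append_assoc]
    simp [List.replicate_succ]
  | case2 routes h =>
    have h0 : (n - (routes.length : Int)).toNat = 0 := by omega
    simp [h0]

-- A's scan-with-break, padded and sliced [:n], equals the break-free scan padded and sliced
lemma pvA_loop_slice (n : Int) (rest : List Int) :
    ∀ (routes : List (List Int)) (cur : List Int),
      PySem.List.slice (pvPadded (pvA_loop rest n routes cur) n) none (some n)
        = PySem.List.slice (pvPadded (routes ++ pvSegs cur rest) n) none (some n) := by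
  induction rest with
  | nil => intro routes cur; simp [pvA_loop, pvSegs]
  | cons x t ih =>
    intro routes cur
    have hlen : ((cur ++ [x]).length > 1) ↔ cur ≠ [] := by cases cur <;> simp
    simp only [pvA_loop, pvSegs, hlen]
    by_cases h0 : x = 0 ∧ cur ≠ []
    · rw [if_pos h0, if_pos h0]
      by_cases hb : (((routes ++ [cur ++ [x]]).length : Int)) = n
      · rw [if_pos hb]
        have hnn : 0 ≤ n := by omega
        unfold pvPadded
        rw [show routes ++ (cur ++ [x]) :: pvSegs [] t
            = (routes ++ [cur ++ [x]]) ++ pvSegs [] t by simp]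
        have hz : (n - ((routes ++ [cur ++ [x]]).length : Int)).toNat = 0 := by omega
        have hz2 : (n - (((routes ++ [cur ++ [x]]) ++ pvSegs [] t).length : Int)).toNat = 0 := by
          simp only [List.length_append] at hb ⊢
          omega
        rw [hz, hz2, PySem.List.slice_to _ hnn, PySem.List.slice_to _ hnn]
        have hn : n.toNat = (routes ++ [cur ++ [x]]).length := by omega
        simp only [List.replicate_zero, List.append_nil, hn, List.take_left, List.take_length]
      · rw [if_neg hb, ih]
        rw [show routes ++ (cur ++ [x]) :: pvSegs [] t
            = (routes ++ [cur ++ [x]]) ++ pvSegs [] t by simp]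
    · rw [if_neg h0, if_neg h0, ih]

-- B's cut-point fold, mapped through slicing, is the break-free scan
lemma pvB_cuts_spec (full : List Int) (suf : List Int) :
    ∀ (k j : Nat) (cuts0 : List (Int × Int)), j ≤ k → full.drop k = suf →
      (((PySem.List.enumerate suf (k : Int)).foldl pvB_step (cuts0, (j : Int))).1).map
          (fun c => PySem.List.slice full (some c.1) (some c.2))
        = cuts0.map (fun c => PySem.List.slice full (some c.1) (some c.2))
          ++ pvSegs ((full.drop j).take (k - j)) suf := by
  induction suf with
  | nil => intro k j cuts0 hjk hk; simp [PySem.List.enumerate_nil, pvSegs]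
  | cons x t ih =>
    intro k j cuts0 hjk hk
    rw [PySem.List.enumerate_cons, List.foldl_cons]
    have hkl : k < full.length := by
      by_contra h
      rw [List.drop_eq_nil_of_le (by omega)] at hk
      exact List.cons_ne_nil x t hk.symm
    have hx : full[k]? = some x := by
      have h0 : (full.drop k)[0]? = some x := by rw [hk]; rfl
      rw [List.getElem?_drop] at h0
      simpa using h0
    have hdt : full.drop (k + 1) = t := by
      have h1 := congrArg (List.drop 1) hk
      simpa [List.drop_drop] using h1
    have hcur : (full.drop j).take (k - j) ++ [x] = (full.drop j).take (k + 1 - j) := by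
      have h1 : k + 1 - j = (k - j) + 1 := by omega
      rw [h1, List.take_add_one]
      have h2 : (full.drop j)[k - j]? = some x := by
        rw [List.getElem?_drop, show j + (k - j) = k by omega, hx]
      simp [h2]
    have hne : (full.drop j).take (k - j) ≠ [] ↔ j < k := by
      rw [ne_eq, ← List.length_eq_zero_iff]
      simp only [List.length_take, List.length_drop]
      omega
    show (((PySem.List.enumerate t ((k:Int) + 1)).foldl pvB_step
        (pvB_step (cuts0, (j:Int)) ((k:Int), x))).1).map _ = _
    by_cases hcond : x = 0 ∧ j < k
    · have hjk' : ((j:Int)) < ((k:Int)) := by exact_mod_cast hcond.2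
      have hstep : pvB_step (cuts0, (j:Int)) ((k:Int), x)
          = (cuts0 ++ [((j:Int), (k:Int) + 1)], (k:Int) + 1) := by
        simp only [pvB_step]
        rw [if_pos ⟨hcond.1, hjk'⟩]
      rw [hstep, show ((k:Int) + 1) = ((k + 1 : Nat) : Int) by push_cast; ring,
        ih (k + 1) (k + 1) _ (le_refl _) hdt]
      simp only [Nat.sub_self, List.take_zero, List.map_append, List.map_cons, List.map_nil]
      rw [show pvSegs ((full.drop j).take (k - j)) (x :: t)
          = ((full.drop j).take (k - j) ++ [x]) :: pvSegs [] t by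
        rw [pvSegs_cons, if_pos ⟨hcond.1, hne.mpr hcond.2⟩]]
      rw [show PySem.List.slice full (some ((j:Nat):Int)) (some ((k+1:Nat):Int))
          = (full.drop j).take (k + 1 - j) from PySem.List.slice_natCast full j (k+1)]
      rw [← hcur]
      simp
    · have hc' : ¬(x = 0 ∧ ((k:Int)) > ((j:Int))) := by
        rintro ⟨h1, h2⟩; exact hcond ⟨h1, by exact_mod_cast h2⟩
      have hstep : pvB_step (cuts0, (j:Int)) ((k:Int), x) = (cuts0, (j:Int)) := by
        simp only [pvB_step]
        rw [if_neg hc']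
      rw [hstep, show ((k:Int) + 1) = ((k + 1 : Nat) : Int) by push_cast; ring,
        ih (k + 1) j _ (by omega) hdt]
      rw [show pvSegs ((full.drop j).take (k - j)) (x :: t)
          = pvSegs ((full.drop j).take (k - j) ++ [x]) t by
        rw [pvSegs_cons, if_neg (by rw [hne]; exact hcond)]]
      rw [hcur]

-- ===== VERDICT (by name: the statement is the Claim_ definition above) =====
theorem parse_solution_string_spec : Claim_equal_parse_solution_string := by
  intro solution n _ _
  unfold Spec_parse_solution_string parse_solution_string parse_solution_string_alt
  cases h : pvTokens solution with
  | nil => rfl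
  | cons flag rest =>
    simp only
    have hcuts := pvB_cuts_spec rest rest 0 0 [] (le_refl 0) (by simp)
    simp only [List.map_nil, List.nil_append, List.drop_zero, Nat.sub_self, List.take_zero,
      Nat.cast_zero] at hcuts
    have hlen : ((((PySem.List.enumerate rest (0:Int)).foldl pvB_step ([], (0:Int))).1).length)
        = (pvSegs [] rest).length := by
      rw [← hcuts, List.length_map]
    rw [pvA_pad_eq, pvA_loop_slice, List.nil_append]
    show _ = (flag, PySem.List.slice (_ ++ PySem.List.pyRepeat [[0,0]] _) none (some n))
    rw [PySem.List.pyRepeat_singleton, hcuts, hlen]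
    rfl
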